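-- pv_equiv track=rewrite | github.com/pego/twin-mind | scripts/twin_mind/entity_graph.py | _scope_chain
-- ===== SOURCE A (Python) =====
-- from typing import Any, DefaultDict, Dict, List, Optional, Sequence, Set, Tuple
--
-- def _scope_chain(src_qualname: str, module_name: str) -> List[str]:
--     scopes: List[str] = []
--     raw = src_qualname.strip()
--     if raw:
--         parts = raw.split(".")
--         for idx in range(len(parts), 0, -1):
--             scopes.append(".".join(parts[:idx]).lower())
--     module_lower = module_name.strip().lower()
--     if module_lower and module_lower not in scopes:
--         scopes.append(module_lower)
--     return scopes
-- ===== SOURCE B (Python) =====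
-- from typing import List
--
-- def _scope_chain(src_qualname: str, module_name: str) -> List[str]:
--     scopes: List[str] = []
--     raw = src_qualname.strip()
--     if raw:
--         parts = raw.split(".")
--         acc = parts[0]
--         fwd = [acc]
--         for p in parts[1:]:
--             acc = acc + "." + p
--             fwd.append(acc)
--         scopes = [s.lower() for s in reversed(fwd)]
--     module_lower = module_name.strip().lower()
--     if module_lower and module_lower not in scopes:
--         scopes.append(module_lower)
--     return scopes
-- ===== Notes on version B (the rewrite author's own statement) =====
-- stated objective: alternative
-- what changed: A re-slices parts[:idx] and re-joins the whole prefix from scratch for every index; B builds each prefix incrementally from the previous one in a single forward pass (acc = acc + '.' + p) and reverses, so no repeated slice-and-join per element.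
import Mathlib
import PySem

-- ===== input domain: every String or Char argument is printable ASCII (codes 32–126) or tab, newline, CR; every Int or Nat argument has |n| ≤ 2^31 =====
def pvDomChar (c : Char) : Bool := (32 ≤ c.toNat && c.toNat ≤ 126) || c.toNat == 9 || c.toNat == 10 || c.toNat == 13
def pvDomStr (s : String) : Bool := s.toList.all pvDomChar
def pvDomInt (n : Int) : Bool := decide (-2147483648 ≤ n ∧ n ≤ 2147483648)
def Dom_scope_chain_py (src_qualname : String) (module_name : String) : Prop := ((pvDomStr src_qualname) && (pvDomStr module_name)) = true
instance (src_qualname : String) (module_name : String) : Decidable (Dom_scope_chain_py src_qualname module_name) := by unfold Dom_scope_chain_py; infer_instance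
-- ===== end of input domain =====

-- ===== PORT A =====
-- Port of A: strings as List Char; for idx in range(len(parts), 0, -1): scopes.append(".".join(parts[:idx]).lower())
def scope_chain_py (src_qualname : String) (module_name : String) : List String :=
  let raw := PySem.Chars.strip src_qualname.toList
  let scopes : List (List Char) :=
    if raw ≠ [] then
      let parts := PySem.Chars.splitOn raw ['.']
      (PySem.List.pyRange (parts.length : Int) 0 (-1)).foldl
        (fun sc idx =>
          sc ++ [PySem.Chars.lower (PySem.Chars.join ['.'] (PySem.List.slice parts none (some idx)))]) []
    else []
  let module_lower := PySem.Chars.lower (PySem.Chars.strip module_name.toList)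
  let scopes := if module_lower ≠ [] ∧ module_lower ∉ scopes then scopes ++ [module_lower] else scopes
  scopes.map String.ofList

-- ===== PORT B =====
-- the 'for p in parts[1:]' loop of Source B: extend the accumulator by "." + p and record each value
def fwdChain (acc : List Char) : List (List Char) → List (List Char)
  | [] => []
  | p :: rest =>
    let acc' := acc ++ '.' :: p
    acc' :: fwdChain acc' rest

-- Port of B: one forward pass extends the accumulator, then reverse and lowercase.
-- (the [] branch of the match is unreachable: split of a nonempty string is nonempty; Python would raise IndexError)
def scope_chain_py_alt (src_qualname : String) (module_name : String) : List String :=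
  let raw := PySem.Chars.strip src_qualname.toList
  let scopes : List (List Char) :=
    if raw ≠ [] then
      match PySem.Chars.splitOn raw ['.'] with
      | [] => []
      | p0 :: rest => ((p0 :: fwdChain p0 rest).reverse).map PySem.Chars.lower
    else []
  let module_lower := PySem.Chars.lower (PySem.Chars.strip module_name.toList)
  let scopes := if module_lower ≠ [] ∧ module_lower ∉ scopes then scopes ++ [module_lower] else scopes
  scopes.map String.ofList

-- ===== PRECONDITION & SPEC =====
def Spec_scope_chain_py (src_qualname : String) (module_name : String) (out : List String) : Prop := out = scope_chain_py_alt src_qualname module_name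
instance (src_qualname : String) (module_name : String) (out : List String) : Decidable (Spec_scope_chain_py src_qualname module_name out) := by unfold Spec_scope_chain_py; infer_instance

-- ===== CLAIM (what is proved, stated in full; the proofs are below) =====
def Claim_equal_scope_chain_py : Prop := ∀ (src_qualname : String) (module_name : String), Dom_scope_chain_py src_qualname module_name → Spec_scope_chain_py src_qualname module_name (scope_chain_py src_qualname module_name)


-- ===== LEMMAS AND PROOFS =====

theorem splitOn_go_ne_nil (sep : List Char) : ∀ (fuel : Nat) (l cur : List Char) (acc : List (List Char)),
    PySem.Chars.splitOn.go sep fuel l cur acc ≠ [] := by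
  intro fuel
  induction fuel with
  | zero => intro l cur acc; simp [PySem.Chars.splitOn.go]
  | succ n ih =>
    intro l cur acc
    cases l with
    | nil => simp [PySem.Chars.splitOn.go]
    | cons c rest =>
      rw [PySem.Chars.splitOn.go]
      split
      · exact ih _ _ _
      · exact ih _ _ _

theorem splitOn_ne_nil (s sep : List Char) : PySem.Chars.splitOn s sep ≠ [] := by
  unfold PySem.Chars.splitOn; exact splitOn_go_ne_nil _ _ _ _ _

theorem foldl_append_singleton {α β : Type} (f : α → β) : ∀ (l : List α) (init : List β),
    l.foldl (fun sc x => sc ++ [f x]) init = init ++ l.map f := by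
  intro l
  induction l with
  | nil => simp
  | cons x xs ih => intro init; simp [List.foldl_cons, ih]

theorem join_cons_shift (p r : List Char) : ∀ (l : List (List Char)),
    PySem.Chars.join ['.'] ((p ++ '.' :: r) :: l) = p ++ '.' :: PySem.Chars.join ['.'] (r :: l) := by
  intro l
  cases l with
  | nil => simp [PySem.Chars.join_singleton]
  | cons q qs => simp [PySem.Chars.join_cons_cons]

theorem fwdChain_eq : ∀ (rest : List (List Char)) (p0 : List Char),
    p0 :: fwdChain p0 rest
      = (List.range (rest.length + 1)).map (fun k => PySem.Chars.join ['.'] (p0 :: rest.take k)) := by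
  intro rest
  induction rest with
  | nil => intro p0; simp [fwdChain, List.range_succ, PySem.Chars.join_singleton]
  | cons r rs ih =>
    intro p0
    have hlen : (r :: rs).length + 1 = (rs.length + 1) + 1 := by simp
    rw [hlen, List.range_succ_eq_map, List.map_cons, List.map_map]
    have htail : (List.range (rs.length + 1)).map
        ((fun k => PySem.Chars.join ['.'] (p0 :: (r :: rs).take k)) ∘ Nat.succ)
        = (List.range (rs.length + 1)).map (fun k => PySem.Chars.join ['.'] ((p0 ++ '.' :: r) :: rs.take k)) := by
      apply List.map_congr_left
      intro k _
      simp only [Function.comp, List.take_succ_cons]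
      rw [PySem.Chars.join_cons_cons, join_cons_shift]
      simp
    rw [htail, ← ih (p0 ++ '.' :: r)]
    simp [fwdChain, PySem.Chars.join_singleton]

theorem reverse_range (n : Nat) : (List.range n).reverse = (List.range n).map (fun k => n - 1 - k) := by
  apply List.ext_getElem
  · simp
  · intro i h1 h2
    simp at h1
    simp [List.getElem_reverse, List.getElem_range]

theorem scopes_eq (p0 : List Char) (rest : List (List Char)) :
    (PySem.List.pyRange (((p0 :: rest).length : Nat) : Int) 0 (-1)).foldl
        (fun sc idx =>
          sc ++ [PySem.Chars.lower (PySem.Chars.join ['.'] (PySem.List.slice (p0 :: rest) none (some idx)))]) []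
      = ((p0 :: fwdChain p0 rest).reverse).map PySem.Chars.lower := by
  rw [PySem.List.pyRange_neg_one, foldl_append_singleton, List.nil_append, List.map_map]
  rw [fwdChain_eq, ← List.map_reverse, reverse_range, List.map_map, List.map_map]
  apply List.map_congr_left
  intro k hk
  simp only [List.mem_range] at hk
  have hn : (p0 :: rest).length = rest.length + 1 := by simp
  simp only [Function.comp]
  have h0 : (0 : Int) ≤ ((p0 :: rest).length : Int) - (k : Int) := by
    rw [hn]; push_cast; omega
  rw [PySem.List.slice_to _ h0]
  have htn : (((p0 :: rest).length : Int) - (k : Int)).toNat = (rest.length - k) + 1 := by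
    rw [hn]; omega
  rw [htn, List.take_succ_cons]
  have hsub : rest.length + 1 - 1 - k = rest.length - k := by omega
  rw [hsub]

-- ===== VERDICT (by name: the statement is the Claim_ definition above) =====
theorem scope_chain_py_spec : Claim_equal_scope_chain_py := by
  intro src_qualname module_name _
  unfold Spec_scope_chain_py scope_chain_py scope_chain_py_alt
  have hscopes :
      (if PySem.Chars.strip src_qualname.toList ≠ [] then
        (PySem.List.pyRange (((PySem.Chars.splitOn (PySem.Chars.strip src_qualname.toList) ['.']).length : Nat) : Int) 0 (-1)).foldl
          (fun sc idx =>
            sc ++ [PySem.Chars.lower (PySem.Chars.join ['.'] (PySem.List.slice (PySem.Chars.splitOn (PySem.Chars.strip src_qualname.toList) ['.']) none (some idx)))]) []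
       else []) =
      (if PySem.Chars.strip src_qualname.toList ≠ [] then
        match PySem.Chars.splitOn (PySem.Chars.strip src_qualname.toList) ['.'] with
        | [] => []
        | p0 :: rest => ((p0 :: fwdChain p0 rest).reverse).map PySem.Chars.lower
       else []) := by
    by_cases hraw : PySem.Chars.strip src_qualname.toList = []
    · simp [hraw]
    · simp only [hraw, ne_eq, not_false_eq_true, if_true]
      cases hs : PySem.Chars.splitOn (PySem.Chars.strip src_qualname.toList) ['.'] with
      | nil => exact absurd hs (splitOn_ne_nil _ _)
      | cons p0 rest => exact scopes_eq p0 rest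
  simp only [hscopes]
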